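-- pv_equiv track=rewrite | github.com/1014369/encrypter | keypad_cipher.py | encrypt_keypad
-- ===== SOURCE A (Python) =====
-- keypad = {
--     'A': '21', 'B': '22', 'C': '23',
--     'D': '31', 'E': '32', 'F': '33',
--     'G': '41', 'H': '42', 'I': '43',
--     'J': '51', 'K': '52', 'L': '53',
--     'M': '61', 'N': '62', 'O': '63',
--     'P': '71', 'Q': '72', 'R': '73', 'S': '74',
--     'T': '81', 'U': '82', 'V': '83',
--     'W': '91', 'X': '92', 'Y': '93', 'Z': '94',
--     ' ': '00'
-- }
--
-- def encrypt_keypad(plaintext: str) -> str: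
--     """Encrypt plaintext to numeric keypad code."""
--     result = []
--     for ch in plaintext.upper():
--         if ch in keypad:
--             result.append(keypad[ch])
--         elif ch == '\n':
--             result.append('00')
--         else:
--             result.append('00')  # unknown = space
--     return ' '.join(result)
-- ===== SOURCE B (Python) =====
-- def _code(ch):
--     o = ord(ch)
--     if 97 <= o <= 122:          # lowercase -> uppercase arithmetically
--         o -= 32
--     if not (65 <= o <= 90):     # not a letter: space/newline/unknown
--         return '00'
--     i = o - 65
--     if i < 15:                  # A..O: regular 3-letter keys 2..6
--         return str(2 + i // 3) + str(i % 3 + 1)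
--     if i < 19:                  # PQRS
--         return '7' + str(i - 14)
--     if i < 22:                  # TUV
--         return '8' + str(i - 18)
--     return '9' + str(i - 21)    # WXYZ
--
--
-- def encrypt_keypad(plaintext: str) -> str:
--     """Encrypt plaintext to numeric keypad code."""
--     return ' '.join(_code(ch) for ch in plaintext)
-- ===== Notes on version B (the rewrite author's own statement) =====
-- stated objective: alternative
-- what changed: B drops the lookup table entirely: it computes each code by closed-form arithmetic on the character's ASCII ordinal (uppercasing by subtracting 32, then digit = 2 + i//3 and position = i%3+1 for A..O with arithmetic corrections for the uneven PQRS/TUV/WXYZ keys), with '00' for every non-letter, instead of A's dict lookup over an upper()-ed string.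
import Mathlib
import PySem

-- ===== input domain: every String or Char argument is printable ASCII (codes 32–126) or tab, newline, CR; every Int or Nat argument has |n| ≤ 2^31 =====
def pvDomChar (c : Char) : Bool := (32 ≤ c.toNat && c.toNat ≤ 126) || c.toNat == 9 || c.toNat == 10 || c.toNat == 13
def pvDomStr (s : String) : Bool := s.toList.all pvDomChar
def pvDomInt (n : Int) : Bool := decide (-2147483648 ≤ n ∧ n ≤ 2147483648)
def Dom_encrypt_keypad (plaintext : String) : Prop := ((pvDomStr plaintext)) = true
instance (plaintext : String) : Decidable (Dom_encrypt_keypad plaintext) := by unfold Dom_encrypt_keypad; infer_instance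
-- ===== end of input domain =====

-- B replaces A's keypad lookup table with closed-form arithmetic on the character's ASCII
-- ordinal (no table, no upper() pass); objective: alternative.

-- ===== PORT A =====
-- the module-level `keypad` dict, in insertion order
def pvKeypad : PySem.Dict Char (List Char) := PySem.Dict.ofList
  [('A', ['2','1']), ('B', ['2','2']), ('C', ['2','3']),
   ('D', ['3','1']), ('E', ['3','2']), ('F', ['3','3']),
   ('G', ['4','1']), ('H', ['4','2']), ('I', ['4','3']),
   ('J', ['5','1']), ('K', ['5','2']), ('L', ['5','3']),
   ('M', ['6','1']), ('N', ['6','2']), ('O', ['6','3']),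
   ('P', ['7','1']), ('Q', ['7','2']), ('R', ['7','3']), ('S', ['7','4']),
   ('T', ['8','1']), ('U', ['8','2']), ('V', ['8','3']),
   ('W', ['9','1']), ('X', ['9','2']), ('Y', ['9','3']), ('Z', ['9','4']),
   (' ', ['0','0'])]

def encrypt_keypad (plaintext : String) : String :=
  -- `ch in keypad` / `keypad[ch]` ported together as a match on Dict.get? (guarded lookup, exact)
  let result : List (List Char) :=
    (PySem.Chars.upper plaintext.toList).foldl (fun result ch =>
      match pvKeypad.get? ch with
      | some code => result ++ [code]
      | none => if ch = '\n' then result ++ [['0','0']] else result ++ [['0','0']]) []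
  String.ofList (PySem.Chars.join [' '] result)

-- ===== PORT B =====
-- _code(ch): closed-form arithmetic on ord(ch)
def pvCodeB (ch : Char) : List Char :=
  let o := ch.toNat
  let o := if 97 ≤ o ∧ o ≤ 122 then o - 32 else o
  if ¬ (65 ≤ o ∧ o ≤ 90) then ['0','0']
  else
    let i := o - 65
    if i < 15 then PySem.Int.toChars (2 + PySem.Int.floordiv (i : Int) 3) ++ PySem.Int.toChars (PySem.Int.mod (i : Int) 3 + 1)
    else if i < 19 then ['7'] ++ PySem.Int.toChars ((i : Int) - 14)
    else if i < 22 then ['8'] ++ PySem.Int.toChars ((i : Int) - 18)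
    else ['9'] ++ PySem.Int.toChars ((i : Int) - 21)

def encrypt_keypad_alt (plaintext : String) : String :=
  String.ofList (PySem.Chars.join [' '] (plaintext.toList.map pvCodeB))

-- ===== PRECONDITION & SPEC =====
def Spec_encrypt_keypad (plaintext : String) (out : String) : Prop := out = encrypt_keypad_alt plaintext
instance (plaintext : String) (out : String) : Decidable (Spec_encrypt_keypad plaintext out) := by unfold Spec_encrypt_keypad; infer_instance

-- ===== CLAIM (what is proved, stated in full; the proofs are below) =====
def Claim_equal_encrypt_keypad : Prop := ∀ (plaintext : String), Dom_encrypt_keypad plaintext → Spec_encrypt_keypad plaintext (encrypt_keypad plaintext)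

-- ===== LEMMAS AND PROOFS =====

-- A's per-character value (used only in the proofs, to rewrite A's foldl as a map)
def pvCodeA (ch : Char) : List Char :=
  match pvKeypad.get? ch with
  | some code => code
  | none => ['0','0']

theorem pvStep_eq (result : List (List Char)) (ch : Char) :
    (match pvKeypad.get? ch with
      | some code => result ++ [code]
      | none => if ch = '\n' then result ++ [['0','0']] else result ++ [['0','0']]) =
    result ++ [pvCodeA ch] := by
  unfold pvCodeA
  cases pvKeypad.get? ch with
  | some code => rfl
  | none => simp only []; split <;> rfl

set_option maxRecDepth 8192 in
theorem pvCode_eq_of_lt (n : Nat) (hn : n < 128) :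
    pvCodeA (PySem.Chars.upperChar (Char.ofNat n)) = pvCodeB (Char.ofNat n) := by
  revert hn; revert n; decide

theorem pvCode_eq (c : Char) (h : c.toNat < 128) :
    pvCodeA (PySem.Chars.upperChar c) = pvCodeB c := by
  have := pvCode_eq_of_lt c.toNat h
  rwa [Char.ofNat_toNat] at this

-- ===== VERDICT (by name: the statement is the Claim_ definition above) =====
theorem encrypt_keypad_spec : Claim_equal_encrypt_keypad := by
  intro plaintext hdom
  unfold Spec_encrypt_keypad encrypt_keypad encrypt_keypad_alt
  have hstep : ∀ (acc : List (List Char)) (ch : Char),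
      (match pvKeypad.get? ch with
        | some code => acc ++ [code]
        | none => if ch = '\n' then acc ++ [['0','0']] else acc ++ [['0','0']]) =
      acc ++ [pvCodeA ch] := pvStep_eq
  simp only [hstep]
  rw [PySem.List.foldl_append_singleton_eq_map]
  simp only [List.nil_append, PySem.Chars.upper, List.map_map]
  congr 1
  congr 1
  apply List.map_congr_left
  intro c hc
  have hdc : pvDomChar c = true := (List.all_eq_true.mp hdom) c hc
  have hlt : c.toNat < 128 := by
    unfold pvDomChar at hdc; simp at hdc; omega
  exact pvCode_eq c hlt
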